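-- pv_equiv track=rewrite | github.com/Drogon4231/obsidian-engine | intel/community_engagement.py | _generate_engagement_questions
-- ===== SOURCE A (Python) =====
-- def _generate_engagement_questions(topic: str, era: str = "") -> list[str]:
--     """Generate engagement questions based on the video topic."""
--     topic_lower = topic.lower()
--
--     # Era-specific questions
--     if any(word in topic_lower for word in ["ancient", "roman", "greek", "egypt"]):
--         return [
--             "What part of this story surprised you the most? Drop it in the comments.",
--             "Which ancient civilization do you think had the darkest secrets?",
--         ]
--     elif any(word in topic_lower for word in ["medieval", "dark age", "crusade", "plague"]):
--         return [
--             "Could you have survived this? Be honest.",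
--             "What medieval mystery should we investigate next?",
--         ]
--     elif any(word in topic_lower for word in ["war", "battle", "military", "soldier"]):
--         return [
--             "History is written by the victors. What do you think really happened?",
--             "What's the most overlooked conflict in history?",
--         ]
--     elif any(word in topic_lower for word in ["conspiracy", "secret", "cover", "hidden"]):
--         return [
--             "Do you think the truth is still being hidden? Let us know below.",
--             "What other cover-ups should we dig into?",
--         ]
--     elif any(word in topic_lower for word in ["murder", "death", "assassin", "poison"]):
--         return [
--             "Who do you think was really behind it? Drop your theory.",
--             "What's the most suspicious death in history that no one talks about?",
--         ]
--
--     # Generic fallback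
--     return [
--         "What part of this story shocked you the most?",
--         "What dark chapter of history should we cover next?",
--     ]
-- ===== SOURCE B (Python) =====
-- _QUESTION_SETS = [
--     [
--         "What part of this story surprised you the most? Drop it in the comments.",
--         "Which ancient civilization do you think had the darkest secrets?",
--     ],
--     [
--         "Could you have survived this? Be honest.",
--         "What medieval mystery should we investigate next?",
--     ],
--     [
--         "History is written by the victors. What do you think really happened?",
--         "What's the most overlooked conflict in history?",
--     ],
--     [
--         "Do you think the truth is still being hidden? Let us know below.",
--         "What other cover-ups should we dig into?",
--     ],
--     [
--         "Who do you think was really behind it? Drop your theory.",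
--         "What's the most suspicious death in history that no one talks about?",
--     ],
--     [
--         "What part of this story shocked you the most?",
--         "What dark chapter of history should we cover next?",
--     ],
-- ]
--
-- _KEYWORD_RANK = {
--     "ancient": 0, "roman": 0, "greek": 0, "egypt": 0,
--     "medieval": 1, "dark age": 1, "crusade": 1, "plague": 1,
--     "war": 2, "battle": 2, "military": 2, "soldier": 2,
--     "conspiracy": 3, "secret": 3, "cover": 3, "hidden": 3,
--     "murder": 4, "death": 4, "assassin": 4, "poison": 4,
-- }
--
--
-- def _generate_engagement_questions(topic: str, era: str = "") -> list[str]: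
--     """Pick the highest-priority (lowest-rank) keyword match; rank indexes the question table."""
--     topic_lower = topic.lower()
--     best = len(_QUESTION_SETS) - 1  # generic fallback rank
--     for word, rank in _KEYWORD_RANK.items():
--         if rank < best and word in topic_lower:
--             best = rank
--     return list(_QUESTION_SETS[best])
-- ===== Notes on version B (the rewrite author's own statement) =====
-- stated objective: alternative
-- what changed: Replaces the early-return if/elif chain of keyword groups by a single flat keyword-to-rank dict over which one full pass computes the minimum matched rank, which then indexes a question table.
import Mathlib
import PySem

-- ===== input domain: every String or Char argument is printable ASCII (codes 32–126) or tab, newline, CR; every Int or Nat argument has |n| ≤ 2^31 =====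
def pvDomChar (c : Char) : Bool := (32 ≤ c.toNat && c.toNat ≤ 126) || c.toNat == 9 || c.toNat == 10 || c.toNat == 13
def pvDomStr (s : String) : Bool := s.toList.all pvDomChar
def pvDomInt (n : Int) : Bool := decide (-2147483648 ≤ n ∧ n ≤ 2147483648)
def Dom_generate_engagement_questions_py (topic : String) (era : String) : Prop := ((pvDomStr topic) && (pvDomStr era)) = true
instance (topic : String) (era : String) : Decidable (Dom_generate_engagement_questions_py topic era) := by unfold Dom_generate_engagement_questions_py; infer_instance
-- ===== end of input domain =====

-- B replaces A's if/elif chain by a flat keyword→rank map whose minimum matched rank indexes one question table (idiomatic, same cost).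

-- ===== PORT A =====
def generate_engagement_questions_py (topic : String) (_era : String) : List String :=
  let topic_lower := PySem.Str.lower topic
  if (["ancient", "roman", "greek", "egypt"].any (fun word => PySem.Str.isIn word topic_lower)) then
    ["What part of this story surprised you the most? Drop it in the comments.",
     "Which ancient civilization do you think had the darkest secrets?"]
  else if (["medieval", "dark age", "crusade", "plague"].any (fun word => PySem.Str.isIn word topic_lower)) then
    ["Could you have survived this? Be honest.",
     "What medieval mystery should we investigate next?"]
  else if (["war", "battle", "military", "soldier"].any (fun word => PySem.Str.isIn word topic_lower)) then
    ["History is written by the victors. What do you think really happened?",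
     "What's the most overlooked conflict in history?"]
  else if (["conspiracy", "secret", "cover", "hidden"].any (fun word => PySem.Str.isIn word topic_lower)) then
    ["Do you think the truth is still being hidden? Let us know below.",
     "What other cover-ups should we dig into?"]
  else if (["murder", "death", "assassin", "poison"].any (fun word => PySem.Str.isIn word topic_lower)) then
    ["Who do you think was really behind it? Drop your theory.",
     "What's the most suspicious death in history that no one talks about?"]
  else
    ["What part of this story shocked you the most?",
     "What dark chapter of history should we cover next?"]

-- ===== PORT B =====
def pvQuestionSets : List (List String) :=
  [["What part of this story surprised you the most? Drop it in the comments.",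
    "Which ancient civilization do you think had the darkest secrets?"],
   ["Could you have survived this? Be honest.",
    "What medieval mystery should we investigate next?"],
   ["History is written by the victors. What do you think really happened?",
    "What's the most overlooked conflict in history?"],
   ["Do you think the truth is still being hidden? Let us know below.",
    "What other cover-ups should we dig into?"],
   ["Who do you think was really behind it? Drop your theory.",
    "What's the most suspicious death in history that no one talks about?"],
   ["What part of this story shocked you the most?",
    "What dark chapter of history should we cover next?"]]

-- the dict _KEYWORD_RANK, in insertion order
def pvKeywordRank : List (String × Nat) :=
  [("ancient", 0), ("roman", 0), ("greek", 0), ("egypt", 0),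
   ("medieval", 1), ("dark age", 1), ("crusade", 1), ("plague", 1),
   ("war", 2), ("battle", 2), ("military", 2), ("soldier", 2),
   ("conspiracy", 3), ("secret", 3), ("cover", 3), ("hidden", 3),
   ("murder", 4), ("death", 4), ("assassin", 4), ("poison", 4)]

-- one iteration of B's loop: keep the smaller rank if the keyword occurs in the topic
def pvRankStep (t : String) (best : Nat) (wr : String × Nat) : Nat :=
  if wr.2 < best && PySem.Str.isIn wr.1 t then wr.2 else best

def generate_engagement_questions_py_alt (topic : String) (_era : String) : List String :=
  let topic_lower := PySem.Str.lower topic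
  let best := pvKeywordRank.foldl (pvRankStep topic_lower) (pvQuestionSets.length - 1)
  pvQuestionSets.getD best []

-- ===== PRECONDITION & SPEC =====
def Spec_generate_engagement_questions_py (topic : String) (era : String) (out : List String) : Prop := out = generate_engagement_questions_py_alt topic era
instance (topic : String) (era : String) (out : List String) : Decidable (Spec_generate_engagement_questions_py topic era out) := by unfold Spec_generate_engagement_questions_py; infer_instance

-- ===== CLAIM (what is proved, stated in full; the proofs are below) =====
def Claim_equal_generate_engagement_questions_py : Prop := ∀ (topic : String) (era : String), Dom_generate_engagement_questions_py topic era → Spec_generate_engagement_questions_py topic era (generate_engagement_questions_py topic era)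

-- ===== LEMMAS AND PROOFS =====

-- folding B's step over one rank group is: take the group's rank iff some keyword matches and it improves
theorem foldl_rankStep_const (t : String) (r : Nat) (ws : List String) (best : Nat) :
    List.foldl (pvRankStep t) best (ws.map (fun w => (w, r))) =
      if ws.any (fun w => PySem.Str.isIn w t) && decide (r < best) then r else best := by
  induction ws generalizing best with
  | nil => simp
  | cons w ws ih =>
    simp only [List.map_cons, List.foldl_cons, List.any_cons, ih, pvRankStep]
    rcases Bool.eq_false_or_eq_true (PySem.Str.isIn w t) with h1 | h1 <;>
    rcases Bool.eq_false_or_eq_true (ws.any fun w => PySem.Str.isIn w t) with h3 | h3 <;>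
      simp only [h1, h3, Bool.false_and, Bool.true_and, Bool.and_true, Bool.and_false,
        Bool.or_true, Bool.or_false, decide_eq_true_eq] <;>
      split_ifs <;> first | rfl | omega | contradiction

theorem pvKeywordRank_groups :
    pvKeywordRank =
      (["ancient", "roman", "greek", "egypt"].map (fun w => (w, (0:Nat)))) ++
      (["medieval", "dark age", "crusade", "plague"].map (fun w => (w, (1:Nat)))) ++
      (["war", "battle", "military", "soldier"].map (fun w => (w, (2:Nat)))) ++
      (["conspiracy", "secret", "cover", "hidden"].map (fun w => (w, (3:Nat)))) ++
      (["murder", "death", "assassin", "poison"].map (fun w => (w, (4:Nat)))) := rfl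


-- the selection step of both programs as a function of the five group-match booleans
theorem pvSelect (a0 a1 a2 a3 a4 : Bool) :
    (
    if a0 then
      ["What part of this story surprised you the most? Drop it in the comments.",
       "Which ancient civilization do you think had the darkest secrets?"]
    else if a1 then
      ["Could you have survived this? Be honest.",
       "What medieval mystery should we investigate next?"]
    else if a2 then
      ["History is written by the victors. What do you think really happened?",
       "What's the most overlooked conflict in history?"]
    else if a3 then
      ["Do you think the truth is still being hidden? Let us know below.",
       "What other cover-ups should we dig into?"]
    else if a4 then
      ["Who do you think was really behind it? Drop your theory.",
       "What's the most suspicious death in history that no one talks about?"]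
    else
      ["What part of this story shocked you the most?",
       "What dark chapter of history should we cover next?"]) =
    pvQuestionSets.getD
      (if a4 && decide (4 < (if a3 && decide (3 < (if a2 && decide (2 < (if a1 && decide (1 < (if a0 && decide (0 < 5) then 0 else 5)) then 1 else (if a0 && decide (0 < 5) then 0 else 5))) then 2 else (if a1 && decide (1 < (if a0 && decide (0 < 5) then 0 else 5)) then 1 else (if a0 && decide (0 < 5) then 0 else 5)))) then 3 else (if a2 && decide (2 < (if a1 && decide (1 < (if a0 && decide (0 < 5) then 0 else 5)) then 1 else (if a0 && decide (0 < 5) then 0 else 5))) then 2 else (if a1 && decide (1 < (if a0 && decide (0 < 5) then 0 else 5)) then 1 else (if a0 && decide (0 < 5) then 0 else 5))))) then 4 else (if a3 && decide (3 < (if a2 && decide (2 < (if a1 && decide (1 < (if a0 && decide (0 < 5) then 0 else 5)) then 1 else (if a0 && decide (0 < 5) then 0 else 5))) then 2 else (if a1 && decide (1 < (if a0 && decide (0 < 5) then 0 else 5)) then 1 else (if a0 && decide (0 < 5) then 0 else 5)))) then 3 else (if a2 && decide (2 < (if a1 && decide (1 < (if a0 && decide (0 < 5) then 0 else 5)) then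 1 else (if a0 && decide (0 < 5) then 0 else 5))) then 2 else (if a1 && decide (1 < (if a0 && decide (0 < 5) then 0 else 5)) then 1 else (if a0 && decide (0 < 5) then 0 else 5))))) [] := by
  cases a0 <;> cases a1 <;> cases a2 <;> cases a3 <;> cases a4 <;> rfl

-- ===== VERDICT (by name: the statement is the Claim_ definition above) =====
theorem generate_engagement_questions_py_spec : Claim_equal_generate_engagement_questions_py := by
  intro topic era _
  show generate_engagement_questions_py topic era = generate_engagement_questions_py_alt topic era
  unfold generate_engagement_questions_py generate_engagement_questions_py_alt
  rw [pvKeywordRank_groups]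
  simp only [List.foldl_append, foldl_rankStep_const,
    show pvQuestionSets.length - 1 = 5 from rfl]
  exact pvSelect _ _ _ _ _
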